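-- pv_equiv track=rewrite | github.com/felicity-moro/CSC-110 | Assignments/eight/assignment8.py | get_oldest_titles
-- ===== SOURCE A (Python) =====
-- Date = tuple[int, int, int]
--
-- YEAR  = 0
--
-- MONTH = 1
--
-- DAY   = 2
--
-- Show = tuple[str, str, list[str], list[str], Date]
--
-- TITLE     = 1
--
-- DATE      = 4
--
-- def is_before(date1:Date, date2:Date)->bool:
--
--     if date1[YEAR] < date2[YEAR]:
--         return True
--
--     if date1[YEAR] > date2[YEAR]:
--         return False
--     elif date1[MONTH] > date2[MONTH] and date1[YEAR] == date2[YEAR]: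
--         return False
--     elif date1[DAY] >= date2[DAY] and date1[MONTH] == date2[MONTH] and date1[YEAR] == date2[YEAR] :
--         return False
--
--     return True
--
-- def get_oldest_titles(show_data: list[Show]) -> list[str]:
--     """ Returns a list of the titles of NetflixShows in show_data
--     with the oldest added date
--
--     >>> shows_unique_dates = [\
--     ('Movie', 'Super Monsters Save Halloween', [],\
--     ['Elyse Maloway', 'Vincent Tong', 'Erin Matthews', 'Andrea Libman',\
--     'Alessandro Juliani', 'Nicole Anthony', 'Diana Kaarina', 'Ian James Corlett',\
--     'Britt McKillip', 'Kathleen Barr'], (2018, 10, 5)),\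
--     ('TV Show', 'First and Last', [], [], (2018, 9, 7)),\
--     ('Movie', 'Out of Thin Air', ['Dylan Howitt'], [], (2017, 9, 29))]
--
--     >>> shows_duplicate_oldest_date = [\
--     ('Movie', 'Super Monsters Save Halloween', [],\
--     ['Elyse Maloway', 'Vincent Tong', 'Erin Matthews', 'Andrea Libman',\
--     'Alessandro Juliani', 'Nicole Anthony', 'Diana Kaarina',\
--     'Ian James Corlett', 'Britt McKillip', 'Kathleen Barr'], (2017, 9, 29)),\
--     ('TV Show', 'First and Last', [], [], (2018, 9, 7)),\
--     ('Movie', 'Out of Thin Air', ['Dylan Howitt'], [], (2017, 9, 29))]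
--
--     >>> get_oldest_titles([])
--     []
--     >>> get_oldest_titles(shows_unique_dates)
--     ['Out of Thin Air']
--     >>> get_oldest_titles(shows_duplicate_oldest_date)
--     ['Super Monsters Save Halloween', 'Out of Thin Air']
--     """
--     if len(show_data) == 0:
--         return []
--
--     oldest_date = show_data[0][DATE]
--     for show in show_data:
--         if is_before(show[DATE],oldest_date):
--             oldest_date = show[DATE]
--
--     shows = []
--     for show in show_data:
--         if show[DATE] == oldest_date:
--             shows.append(show[TITLE])
--
--     return shows
-- ===== SOURCE B (Python) =====
-- def get_oldest_titles(show_data):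
--     oldest = None
--     titles = []
--     for show in show_data:
--         d = show[4]
--         if oldest is None or d < oldest:
--             oldest = d
--             titles = [show[1]]
--         elif d == oldest:
--             titles.append(show[1])
--     return titles
-- ===== Notes on version B (the rewrite author's own statement) =====
-- stated objective: simpler
-- what changed: Replaced the two-pass scheme (min-date fold via a hand-written is_before comparator, then a second filtering pass) by one single-pass loop that keeps the oldest date and the title list, resetting the list on a strictly smaller date (native tuple comparison) and appending on a tie.
import Mathlib
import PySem

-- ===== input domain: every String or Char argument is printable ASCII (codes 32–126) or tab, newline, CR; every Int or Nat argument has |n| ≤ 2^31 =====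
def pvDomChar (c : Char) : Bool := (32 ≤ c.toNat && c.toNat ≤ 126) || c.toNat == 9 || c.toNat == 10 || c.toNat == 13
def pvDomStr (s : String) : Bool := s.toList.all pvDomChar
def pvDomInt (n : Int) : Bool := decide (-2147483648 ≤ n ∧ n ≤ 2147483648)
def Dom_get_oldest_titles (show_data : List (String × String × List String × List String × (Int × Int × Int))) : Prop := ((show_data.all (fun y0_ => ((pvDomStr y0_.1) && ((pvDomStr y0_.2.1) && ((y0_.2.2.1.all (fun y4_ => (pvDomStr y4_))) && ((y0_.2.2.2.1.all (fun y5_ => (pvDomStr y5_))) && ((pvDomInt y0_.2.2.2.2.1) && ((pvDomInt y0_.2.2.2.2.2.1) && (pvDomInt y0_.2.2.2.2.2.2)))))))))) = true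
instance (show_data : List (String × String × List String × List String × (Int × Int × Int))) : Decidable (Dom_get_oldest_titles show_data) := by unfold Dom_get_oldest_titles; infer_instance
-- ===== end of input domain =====

-- B replaces A's two passes (min-date fold with a hand-written comparator, then a filter pass)
-- by a single pass maintaining the oldest date and the matching titles; objective: simpler.

-- ===== PORT A =====
-- helper is_before, transliterated branch for branch from A
def is_before (date1 date2 : Int × Int × Int) : Bool :=
  if date1.1 < date2.1 then true
  else if date1.1 > date2.1 then false
  else if date1.2.1 > date2.2.1 ∧ date1.1 = date2.1 then false
  else if date1.2.2 ≥ date2.2.2 ∧ date1.2.1 = date2.2.1 ∧ date1.1 = date2.1 then false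
  else true

def get_oldest_titles (show_data : List (String × String × List String × List String × (Int × Int × Int))) : List String :=
  match show_data with
  | [] => []
  | s0 :: _ =>
    -- first loop: fold the oldest date over all shows, seeded with show_data[0][DATE]
    let oldest_date := show_data.foldl
      (fun old sh => if is_before sh.2.2.2.2 old then sh.2.2.2.2 else old) s0.2.2.2.2
    -- second loop: append matching titles
    show_data.foldl
      (fun shows sh => if sh.2.2.2.2 = oldest_date then shows ++ [sh.2.1] else shows) []

-- ===== PORT B =====
-- Python tuple '<' on a 3-tuple of ints (B compares dates natively)
def tupLt (a b : Int × Int × Int) : Bool :=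
  decide (a.1 < b.1 ∨ (a.1 = b.1 ∧ (a.2.1 < b.2.1 ∨ (a.2.1 = b.2.1 ∧ a.2.2 < b.2.2))))

-- B's single loop, after the first iteration has replaced oldest = None
def altLoop : List (String × String × List String × List String × (Int × Int × Int)) →
    (Int × Int × Int) → List String → List String
  | [], _, titles => titles
  | sh :: rest, oldest, titles =>
    if tupLt sh.2.2.2.2 oldest then altLoop rest sh.2.2.2.2 [sh.2.1]
    else if sh.2.2.2.2 = oldest then altLoop rest oldest (titles ++ [sh.2.1])
    else altLoop rest oldest titles

def get_oldest_titles_alt (show_data : List (String × String × List String × List String × (Int × Int × Int))) : List String :=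
  match show_data with
  | [] => []
  | s0 :: rest => altLoop rest s0.2.2.2.2 [s0.2.1]

-- ===== PRECONDITION & SPEC =====
def Spec_get_oldest_titles (show_data : List (String × String × List String × List String × (Int × Int × Int))) (out : List String) : Prop := out = get_oldest_titles_alt show_data
instance (show_data : List (String × String × List String × List String × (Int × Int × Int))) (out : List String) : Decidable (Spec_get_oldest_titles show_data out) := by unfold Spec_get_oldest_titles; infer_instance

-- ===== CLAIM (what is proved, stated in full; the proofs are below) =====
def Claim_equal_get_oldest_titles : Prop := ∀ (show_data : List (String × String × List String × List String × (Int × Int × Int))), Dom_get_oldest_titles show_data → Spec_get_oldest_titles show_data (get_oldest_titles show_data)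

-- ===== LEMMAS AND PROOFS =====

-- A's comparator is exactly strict lexicographic tuple '<'
theorem is_before_eq_tupLt (a b : Int × Int × Int) : is_before a b = tupLt a b := by
  rcases a with ⟨a1, a2, a3⟩; rcases b with ⟨b1, b2, b3⟩
  simp only [is_before, tupLt]
  split_ifs <;> simp_all <;> omega

-- the min-date fold (stated with tupLt)
def fmin (l : List (String × String × List String × List String × (Int × Int × Int)))
    (old : Int × Int × Int) : Int × Int × Int :=
  l.foldl (fun old sh => if tupLt sh.2.2.2.2 old then sh.2.2.2.2 else old) old

theorem tupLt_irrefl (a : Int × Int × Int) : tupLt a a = false := by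
  simp [tupLt]

theorem tupLt_trans {a b c : Int × Int × Int} (h1 : tupLt a b = true) (h2 : tupLt b c = true) :
    tupLt a c = true := by
  simp only [tupLt, decide_eq_true_eq] at *; omega

theorem tupLt_total {a b : Int × Int × Int} (h1 : tupLt a b = false) (h2 : tupLt b a = false) :
    a = b := by
  rcases a with ⟨a1, a2, a3⟩; rcases b with ⟨b1, b2, b3⟩
  simp only [tupLt, decide_eq_false_iff_not] at *
  simp only [Prod.mk.injEq]; omega

theorem fmin_le (l : List (String × String × List String × List String × (Int × Int × Int)))
    (old : Int × Int × Int) : tupLt old (fmin l old) = false := by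
  induction l generalizing old with
  | nil => simp [fmin, tupLt_irrefl]
  | cons s l ih =>
    have hfm : fmin (s :: l) old = fmin l (if tupLt s.2.2.2.2 old then s.2.2.2.2 else old) := by
      simp [fmin]
    rw [hfm]
    by_cases h : tupLt s.2.2.2.2 old = true
    · rw [if_pos h]
      cases hlt : tupLt old (fmin l s.2.2.2.2) with
      | false => rfl
      | true => exact absurd (tupLt_trans h hlt) (by simp [ih s.2.2.2.2])
    · rw [if_neg h]
      exact ih old

-- invariant of B's loop, expressed through A's second pass (filter + map)
theorem altLoop_inv (l : List (String × String × List String × List String × (Int × Int × Int)))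
    (old : Int × Int × Int) (acc : List String) :
    altLoop l old acc =
      (if fmin l old = old then acc else []) ++
        (l.filter (fun s => s.2.2.2.2 = fmin l old)).map (fun s => s.2.1) := by
  induction l generalizing old acc with
  | nil => simp [altLoop, fmin]
  | cons s l ih =>
    have hfm : fmin (s :: l) old = fmin l (if tupLt s.2.2.2.2 old then s.2.2.2.2 else old) := by
      simp [fmin]
    by_cases h : tupLt s.2.2.2.2 old = true
    · -- strictly smaller date: reset the accumulator
      have hfm2 : fmin (s :: l) old = fmin l s.2.2.2.2 := by rw [hfm, if_pos h]
      have hne : fmin l s.2.2.2.2 ≠ old := by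
        intro he
        have hf := fmin_le l s.2.2.2.2
        rw [he, h] at hf
        simp at hf
      rw [hfm2]
      simp only [altLoop]
      rw [if_pos h, ih, if_neg hne]
      rcases eq_or_ne (fmin l s.2.2.2.2) s.2.2.2.2 with hs | hs
      · simp [hs]
      · have hs' : ¬ (s.2.2.2.2 = fmin l s.2.2.2.2) := fun hh => hs hh.symm
        simp [hs, hs']
    · have h' : tupLt s.2.2.2.2 old = false := eq_false_of_ne_true h
      have hfm2 : fmin (s :: l) old = fmin l old := by rw [hfm, if_neg h]
      rw [hfm2]
      by_cases he : s.2.2.2.2 = old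
      · -- tied date: append the title
        simp only [altLoop]
        rw [if_neg h, if_pos he, ih]
        rcases eq_or_ne (fmin l old) old with hm | hm
        · simp [he, hm]
        · have hm' : ¬ (old = fmin l old) := fun hh => hm hh.symm
          simp [he, hm, hm']
      · -- larger date: skip
        simp only [altLoop]
        rw [if_neg h, if_neg he, ih]
        have hs : ¬ (s.2.2.2.2 = fmin l old) := by
          intro hh
          have h2 : tupLt old s.2.2.2.2 = false := by rw [hh]; exact fmin_le l old
          exact he (tupLt_total h' h2)
        simp [hs]

theorem get_oldest_titles_eq (show_data : List (String × String × List String × List String × (Int × Int × Int))) :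
    get_oldest_titles show_data = get_oldest_titles_alt show_data := by
  cases show_data with
  | nil => rfl
  | cons s0 rest =>
    have hcomp : (fun (old : Int × Int × Int) (sh : String × String × List String × List String × (Int × Int × Int)) =>
        if is_before sh.2.2.2.2 old then sh.2.2.2.2 else old) =
        (fun old sh => if tupLt sh.2.2.2.2 old then sh.2.2.2.2 else old) := by
      funext o s; rw [is_before_eq_tupLt]
    have hm : (s0 :: rest).foldl
        (fun old sh => if is_before sh.2.2.2.2 old then sh.2.2.2.2 else old) s0.2.2.2.2
        = fmin rest s0.2.2.2.2 := by
      rw [hcomp]; simp [fmin, tupLt_irrefl]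
    simp only [get_oldest_titles, get_oldest_titles_alt, hm]
    rw [PySem.List.foldl_append_ite
      (fun s : String × String × List String × List String × (Int × Int × Int) =>
        s.2.2.2.2 = fmin rest s0.2.2.2.2)
      (fun s : String × String × List String × List String × (Int × Int × Int) => s.2.1)]
    rw [altLoop_inv]
    by_cases h0 : s0.2.2.2.2 = fmin rest s0.2.2.2.2
    · by_cases hm0 : fmin rest s0.2.2.2.2 = s0.2.2.2.2
      · simp [List.filter_cons, hm0]
      · exact absurd h0.symm hm0
    · have hm0 : ¬ fmin rest s0.2.2.2.2 = s0.2.2.2.2 := fun hh => h0 hh.symm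
      simp [h0, hm0]

-- ===== VERDICT (by name: the statement is the Claim_ definition above) =====
theorem get_oldest_titles_spec : Claim_equal_get_oldest_titles := by
  intro sd _
  unfold Spec_get_oldest_titles
  exact get_oldest_titles_eq sd
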